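-- pv_equiv track=rewrite | github.com/JOJOSHEAVEN/BSRN-Projekt_22 | main.py | pruefen
-- ===== SOURCE A (Python) =====
-- def pruefen(schiff, besetzt):
--     schiff.sort()   # .sort() sortiert alle Elemente in der Liste
--     for i in range(len(schiff)):
--         zahl = schiff[i]
--
--         if zahl in besetzt:
--             schiff = [-1]   # [-1] bedeutet index von hinten
--             break
--
--         elif zahl < 0 or zahl > 99:
--             schiff = [-1]
--             break
--
--     return schiff
-- ===== SOURCE B (Python) =====
-- # Simpler: in-place sort kept (same observable mutation as A), then validity via one
-- # set intersection for occupancy and a constant-size sorted-endpoint bounds check.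
-- def pruefen(schiff, besetzt):
--     schiff.sort()
--     bad = set(schiff) & set(besetzt)
--     if bad or (schiff and (schiff[0] < 0 or schiff[-1] > 99)):
--         return [-1]
--     return schiff
-- ===== Notes on version B (the rewrite author's own statement) =====
-- stated objective: simpler
-- what changed: The element-by-element scan with break is replaced by a set intersection for occupancy plus a bounds check on only the two endpoints of the sorted list.
import Mathlib
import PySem

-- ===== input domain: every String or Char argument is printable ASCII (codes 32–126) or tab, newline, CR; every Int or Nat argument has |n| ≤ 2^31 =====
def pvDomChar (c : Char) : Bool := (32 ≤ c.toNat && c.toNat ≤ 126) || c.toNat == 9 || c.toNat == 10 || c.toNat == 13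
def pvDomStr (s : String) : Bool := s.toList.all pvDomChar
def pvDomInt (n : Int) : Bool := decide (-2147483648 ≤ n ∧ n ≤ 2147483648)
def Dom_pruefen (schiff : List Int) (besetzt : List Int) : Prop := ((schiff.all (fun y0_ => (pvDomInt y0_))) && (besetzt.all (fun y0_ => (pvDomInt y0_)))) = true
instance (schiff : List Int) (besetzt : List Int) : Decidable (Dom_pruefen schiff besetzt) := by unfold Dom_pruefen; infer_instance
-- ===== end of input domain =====

-- B replaces the per-element scan by a set intersection plus a sorted-endpoint bounds check (objective: simpler).
-- A sorts its argument in place; the equivalence proved here is about the return value (B performs the same sort).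

-- ===== PORT A =====
-- the for-loop with break: scans the sorted list; on the first offending element returns [-1]
def pruefenLoop (besetzt : List Int) (s : List Int) (rest : List Int) : List Int :=
  match rest with
  | [] => s
  | zahl :: t =>
    if zahl ∈ besetzt then [-1]
    else if zahl < 0 ∨ zahl > 99 then [-1]
    else pruefenLoop besetzt s t

def pruefen (schiff : List Int) (besetzt : List Int) : List Int :=
  let s := PySem.List.sorted schiff (fun x => x) false
  pruefenLoop besetzt s s

-- ===== PORT B =====
def pruefen_alt (schiff : List Int) (besetzt : List Int) : List Int :=
  let s := PySem.List.sorted schiff (fun x => x) false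
  let bad := PySem.Set.inter (PySem.Set.ofList s) besetzt
  if !bad.isEmpty || (!s.isEmpty && (s.headD 0 < 0 || s.getLastD 0 > 99)) then [-1] else s

-- ===== PRECONDITION & SPEC =====
def Spec_pruefen (schiff : List Int) (besetzt : List Int) (out : List Int) : Prop := out = pruefen_alt schiff besetzt
instance (schiff : List Int) (besetzt : List Int) (out : List Int) : Decidable (Spec_pruefen schiff besetzt out) := by unfold Spec_pruefen; infer_instance

-- ===== CLAIM (what is proved, stated in full; the proofs are below) =====
def Claim_equal_pruefen : Prop := ∀ (schiff : List Int) (besetzt : List Int), Dom_pruefen schiff besetzt → Spec_pruefen schiff besetzt (pruefen schiff besetzt)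

-- ===== LEMMAS AND PROOFS =====

-- A's loop returns [-1] iff some element offends, else the (sorted) list itself
theorem pruefenLoop_eq (besetzt s : List Int) (rest : List Int) :
    pruefenLoop besetzt s rest =
      if ∃ z ∈ rest, z ∈ besetzt ∨ z < 0 ∨ z > 99 then [-1] else s := by
  induction rest with
  | nil => simp [pruefenLoop]
  | cons z t ih =>
    simp only [pruefenLoop, ih]
    by_cases h1 : z ∈ besetzt
    · simp [h1]
    · by_cases h2 : z < 0 ∨ z > 99
      · simp [h1, h2]
      · by_cases h3 : ∃ w ∈ t, w ∈ besetzt ∨ w < 0 ∨ w > 99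
        · simp [h1, h2, h3]
        · simp [h1, h2, h3]

-- in a ≤-sorted list, the last element is maximal
theorem le_getLastD_of_pairwise (l : List Int) (hl : l.Pairwise (· ≤ ·)) :
    ∀ y ∈ l, y ≤ l.getLastD 0 := by
  induction l with
  | nil => simp
  | cons a t ih =>
    intro y hy
    rcases List.pairwise_cons.1 hl with ⟨ha, ht⟩
    cases t with
    | nil =>
      have : y = a := by simpa using hy
      simp [this]
    | cons b u =>
      rcases List.mem_cons.1 hy with hy' | hy'
      · subst hy'
        exact le_trans (ha b (by simp)) (ih ht b (by simp))
      · exact ih ht y hy'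

-- in a ≤-sorted list, the head is minimal
theorem headD_le_of_pairwise (l : List Int) (hl : l.Pairwise (· ≤ ·)) :
    ∀ y ∈ l, l.headD 0 ≤ y := by
  intro y hy
  cases l with
  | nil => simp at hy
  | cons a t =>
    rcases List.pairwise_cons.1 hl with ⟨ha, _⟩
    rcases List.mem_cons.1 hy with hy' | hy'
    · simp [hy']
    · exact ha y hy'

theorem inter_empty_iff (s besetzt : List Int) :
    (PySem.Set.inter (PySem.Set.ofList s) besetzt).isEmpty = true ↔ ¬ ∃ z ∈ s, z ∈ besetzt := by
  rw [List.isEmpty_iff, List.eq_nil_iff_forall_not_mem]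
  simp only [PySem.Set.mem_inter, PySem.Set.mem_ofList]
  constructor
  · rintro h ⟨z, hz, hb⟩
    exact h z ⟨hz, hb⟩
  · rintro h a ⟨h1, h2⟩
    exact h ⟨a, h1, h2⟩

-- ===== VERDICT (by name: the statement is the Claim_ definition above) =====
theorem pruefen_spec : Claim_equal_pruefen := by
  intro schiff besetzt _
  unfold Spec_pruefen pruefen pruefen_alt
  set s := PySem.List.sorted schiff (fun x => x) false with hs
  have hpw : s.Pairwise (· ≤ ·) := by
    simpa using PySem.List.sorted_pairwise (xs := schiff) (key := fun x => x)
  rw [pruefenLoop_eq]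
  have hiff : (∃ z ∈ s, z ∈ besetzt ∨ z < 0 ∨ z > 99) ↔
      (!(PySem.Set.inter (PySem.Set.ofList s) besetzt).isEmpty
        || (!s.isEmpty && (decide (s.headD 0 < 0) || decide (s.getLastD 0 > 99)))) = true := by
    constructor
    · rintro ⟨z, hz, hzb | hzb⟩
      · have : (PySem.Set.inter (PySem.Set.ofList s) besetzt).isEmpty = false := by
          cases hb : (PySem.Set.inter (PySem.Set.ofList s) besetzt).isEmpty with
          | false => rfl
          | true => exact absurd ⟨z, hz, hzb⟩ ((inter_empty_iff s besetzt).1 hb)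
        rw [this, Bool.not_false, Bool.true_or]
      · have hne : s.isEmpty = false := by
          have : s ≠ [] := List.ne_nil_of_mem hz
          simpa using this
        have hend : (decide (s.headD 0 < 0) || decide (s.getLastD 0 > 99)) = true := by
          rcases hzb with h | h
          · have := headD_le_of_pairwise s hpw z hz
            simp only [Bool.or_eq_true, decide_eq_true_eq]; left; omega
          · have := le_getLastD_of_pairwise s hpw z hz
            simp only [Bool.or_eq_true, decide_eq_true_eq]; right; omega
        rw [hne, hend, Bool.not_false, Bool.and_true, Bool.or_true]
    · intro h
      rw [Bool.or_eq_true] at h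
      rcases h with h | h
      · have hnot : ¬ (PySem.Set.inter (PySem.Set.ofList s) besetzt).isEmpty = true := by
          simpa using h
        have hocc : ∃ z ∈ s, z ∈ besetzt :=
          not_not.1 (fun hno => hnot ((inter_empty_iff s besetzt).2 hno))
        rcases hocc with ⟨z, hz, hzb⟩
        exact ⟨z, hz, Or.inl hzb⟩
      · rw [Bool.and_eq_true, Bool.or_eq_true] at h
        rcases h with ⟨hne, hend⟩
        have hsne : s ≠ [] := by simpa using hne
        rcases List.exists_cons_of_ne_nil hsne with ⟨a, t, hst⟩
        rcases hend with hh | hh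
        · have hh' : s.headD 0 < 0 := of_decide_eq_true hh
          have hmem : s.headD 0 ∈ s := by rw [hst]; simp
          exact ⟨s.headD 0, hmem, Or.inr (Or.inl hh')⟩
        · have hh' : s.getLastD 0 > 99 := of_decide_eq_true hh
          have hmem : s.getLastD 0 ∈ s := by
            rw [hst, List.getLastD_cons]
            exact List.getLastD_mem_cons (l := t) (a := a)
          exact ⟨s.getLastD 0, hmem, Or.inr (Or.inr hh')⟩
  by_cases hx : ∃ z ∈ s, z ∈ besetzt ∨ z < 0 ∨ z > 99
  · rw [if_pos hx, if_pos (hiff.1 hx)]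
  · rw [if_neg hx, if_neg (fun hc => hx (hiff.2 hc))]
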